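-- pv_equiv track=rewrite | github.com/mizz0224/AlgorithmStudy | 프로그래머스/lv2/60058. 괄호 변환/괄호 변환.py | solution
-- ===== SOURCE A (Python) =====
-- def solution(p):
--     #1.
--     if p == "" :
--         return ""
--     #2.
--     u,v = spliter(p)
--     #3.
--     if check(u):
--         #3-1.
--         return u + solution(v)
--     #4.
--     else:
--         #4-1.
--         answer = "("
--         #4-2.
--         answer += solution(v)
--         #4-3.
--         answer += ")"
--         #4-4.
--         for p in u[1:-1]:
--             if p == "(":
--                 answer += ")"
--             else:
--                 answer += "("
--         return answer
--
-- def spliter(w):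
--     openCounter = 0
--     closeCounter = 0
--     u = ""
--     v = ""
--     for i in range(0,len(w)):
--         if w[i] == "(":
--             openCounter += 1
--         else :
--             closeCounter += 1
--         if openCounter == closeCounter :
--             u = w[:i+1]
--             v = w[i+1:]
--             break
--     return u,v
--
-- def check(w):
--     howOpen = 0
--     for i in range(0,len(w)):
--         if w[i] == "(":
--             howOpen += 1
--         else :
--             howOpen -= 1
--         if howOpen < 0:
--             return False
--     return howOpen == 0
-- ===== SOURCE B (Python) =====
-- def solution(p):
--     # stage 1: one forward pass splits p into its minimal balanced segments
--     segs = []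
--     cur = []
--     bal = 0
--     for c in p:
--         cur.append(c)
--         bal += 1 if c == '(' else -1
--         if bal == 0:
--             segs.append(cur)
--             cur = []
--     # an unbalanced trailing part (left in cur) contributes nothing
--     # stage 2: assemble the answer back-to-front over the segment list
--     acc = []
--     for s in reversed(segs):
--         if s[0] == '(':
--             acc = s + acc
--         else:
--             acc = ['('] + acc + [')'] + [')' if c == '(' else '(' for c in s[1:-1]]
--     return ''.join(acc)
-- ===== Notes on version B (the rewrite author's own statement) =====
-- stated objective: alternative
-- what changed: B replaces A's recursive slice-and-check procedure by two staged passes: a single forward pass splits p into its list of minimal balanced segments, then a right-to-left fold over that segment list assembles the answer back-to-front; the check() rescan disappears (a minimal balanced segment is valid iff it starts with '(').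
import Mathlib
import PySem

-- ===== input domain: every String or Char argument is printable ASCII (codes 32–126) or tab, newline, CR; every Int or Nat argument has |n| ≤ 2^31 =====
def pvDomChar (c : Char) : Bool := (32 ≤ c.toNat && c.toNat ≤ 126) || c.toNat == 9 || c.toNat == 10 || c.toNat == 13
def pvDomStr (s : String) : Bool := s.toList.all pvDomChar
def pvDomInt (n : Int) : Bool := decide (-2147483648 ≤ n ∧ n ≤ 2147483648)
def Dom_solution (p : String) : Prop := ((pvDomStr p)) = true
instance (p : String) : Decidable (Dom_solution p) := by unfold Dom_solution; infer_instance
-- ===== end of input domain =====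

-- B replaces A's recursive slice-and-check procedure by two staged passes: split p once into
-- its minimal balanced segments, then a right-to-left fold over the segment list.

-- ===== PORT A =====
-- spliter's for-loop: scan w, counting, break at the first index where the counters agree;
-- 'pre' is the prefix already scanned (so u = w[:i+1] = pre ++ [c], v = w[i+1:] = rest).
def spliterAux : List Char → Int → Int → List Char → List Char × List Char
  | [], _, _, _ => ([], [])          -- loop ended without break: u, v keep their initial ""
  | c :: rest, oc, cc, pre =>
      let oc' := if c = '(' then oc + 1 else oc
      let cc' := if c = '(' then cc else cc + 1
      if oc' = cc' then (pre ++ [c], rest)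
      else spliterAux rest oc' cc' (pre ++ [c])

def spliter (w : List Char) : List Char × List Char := spliterAux w 0 0 []

def checkAux : List Char → Int → Bool
  | [], h => decide (h = 0)
  | c :: rest, h =>
      let h' := if c = '(' then h + 1 else h - 1
      if h' < 0 then false else checkAux rest h'

def check (w : List Char) : Bool := checkAux w 0

-- termination helper for solutionList: v returned by spliter is strictly shorter
theorem spliterAux_snd_len : ∀ (w : List Char) (oc cc : Int) (pre : List Char),
    w ≠ [] → (spliterAux w oc cc pre).2.length < w.length := by
  intro w
  induction w with
  | nil => intro _ _ _ h; exact absurd rfl h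
  | cons c rest ih =>
      intro oc cc pre _
      have hstep : ∀ oc' cc' : Int,
          (if oc' = cc' then (pre ++ [c], rest)
            else spliterAux rest oc' cc' (pre ++ [c])).2.length < (c :: rest).length := by
        intro oc' cc'
        split
        · simp
        · by_cases hr : rest = []
          · subst hr; simp [spliterAux]
          · exact Nat.lt_trans (ih _ _ _ hr) (by simp)
      by_cases hc : c = '('
      · simpa only [spliterAux, hc, if_pos, reduceIte] using hstep (oc + 1) cc
      · simpa only [spliterAux, hc, if_neg, reduceIte] using hstep oc (cc + 1)

def solutionList (p : List Char) : List Char :=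
  if hp : p = [] then []
  else
    let uv := spliter p
    if check uv.1 then uv.1 ++ solutionList uv.2
    else
      let answer := ['('] ++ solutionList uv.2 ++ [')']
      ((uv.1.drop 1).dropLast).foldl
        (fun acc c => acc ++ [if c = '(' then ')' else '(']) answer
termination_by p.length
decreasing_by
  all_goals exact spliterAux_snd_len p 0 0 [] hp

def solution (p : String) : String := String.mk (solutionList p.toList)

-- ===== PORT B =====
-- stage-1 loop of Source B: cur collects the current segment's chars, bal the running balance;
-- every time bal hits 0 the finished segment is appended to segs.
def segLoop : List Char → List Char → Int → List (List Char) → List (List Char)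
  | [], _, _, segs => segs
  | c :: rest, cur, bal, segs =>
      let cur' := cur ++ [c]
      let bal' := bal + (if c = '(' then 1 else -1)
      if bal' = 0 then segLoop rest [] bal' (segs ++ [cur'])
      else segLoop rest cur' bal' segs

-- stage-2 loop body of Source B (acc updated per segment, iterating over reversed segs)
def stepB (acc : List Char) (s : List Char) : List Char :=
  if s.getD 0 ' ' = '(' then s ++ acc
  else '(' :: (acc ++ ')' :: ((s.drop 1).dropLast.map (fun c => if c = '(' then ')' else '(')))

def solution_alt (p : String) : String :=
  String.mk ((segLoop p.toList [] 0 []).reverse.foldl stepB [])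

-- ===== PRECONDITION & SPEC =====
def Spec_solution (p : String) (out : String) : Prop := out = solution_alt p
instance (p : String) (out : String) : Decidable (Spec_solution p out) := by unfold Spec_solution; infer_instance

-- ===== CLAIM (what is proved, stated in full; the proofs are below) =====
def Claim_equal_solution : Prop := ∀ (p : String), Dom_solution p → Spec_solution p (solution p)

-- ===== LEMMAS AND PROOFS =====

-- proof-side description of the minimal balanced prefix: none = no prefix of w (scanned from
-- balance d) ever reaches balance 0; some (s, v) = w = s ++ v with s the shortest such prefix
def splitB : List Char → Int → Option (List Char × List Char)
  | [], _ => none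
  | c :: rest, d =>
      let d' := d + (if c = '(' then 1 else -1)
      if d' = 0 then some ([c], rest)
      else (splitB rest d').map (fun sv => (c :: sv.1, sv.2))

theorem splitB_decomp : ∀ (w : List Char) (d : Int) (s v : List Char),
    splitB w d = some (s, v) → w = s ++ v := by
  intro w
  induction w with
  | nil => intro d s v h; simp [splitB] at h
  | cons c rest ih =>
      intro d s v h
      by_cases hc : c = '('
      · subst hc
        simp only [splitB, reduceIte] at h
        split at h
        · simp only [Option.some.injEq, Prod.mk.injEq] at h
          rw [← h.1, ← h.2]; rfl
        · rcases hr : splitB rest (d + 1) with _ | ⟨s₀, v₀⟩ <;> rw [hr] at h <;> simp at h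
          obtain ⟨hs, hv⟩ := h
          subst hs; subst hv
          simpa using ih _ _ _ hr
      · simp only [splitB, hc, reduceIte] at h
        split at h
        · simp only [Option.some.injEq, Prod.mk.injEq] at h
          rw [← h.1, ← h.2]; rfl
        · rcases hr : splitB rest (d + -1) with _ | ⟨s₀, v₀⟩ <;> rw [hr] at h <;> simp at h
          obtain ⟨hs, hv⟩ := h
          subst hs; subst hv
          simpa using ih _ _ _ hr

-- A's spliter computes exactly the splitB decomposition
theorem spliterAux_eq_splitB : ∀ (w : List Char) (oc cc : Int) (pre : List Char),
    spliterAux w oc cc pre =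
      (match splitB w (oc - cc) with
        | some (s, v) => (pre ++ s, v)
        | none => ([], [])) := by
  intro w
  induction w with
  | nil => intro oc cc pre; simp [spliterAux, splitB]
  | cons c rest ih =>
      intro oc cc pre
      by_cases hc : c = '('
      · subst hc
        simp only [spliterAux, splitB, reduceIte]
        by_cases hb : oc + 1 = cc
        · rw [if_pos hb, if_pos (by omega : oc - cc + 1 = 0)]
        · rw [if_neg hb, if_neg (by omega : ¬ oc - cc + 1 = 0)]
          rw [ih (oc + 1) cc (pre ++ ['('])]
          have he : oc + 1 - cc = oc - cc + 1 := by ring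
          rw [he]
          rcases splitB rest (oc - cc + 1) with _ | ⟨s₀, v₀⟩ <;> simp
      · simp only [spliterAux, splitB, hc, reduceIte]
        by_cases hb : oc = cc + 1
        · rw [if_pos hb, if_pos (by omega : oc - cc + -1 = 0)]
        · rw [if_neg hb, if_neg (by omega : ¬ oc - cc + -1 = 0)]
          rw [ih oc (cc + 1) (pre ++ [c])]
          have he : oc - (cc + 1) = oc - cc + -1 := by ring
          rw [he]
          rcases splitB rest (oc - cc + -1) with _ | ⟨s₀, v₀⟩ <;> simp

-- B's stage-1 loop: the accumulator distributes
theorem segLoop_acc : ∀ (w cur : List Char) (bal : Int) (segs : List (List Char)),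
    segLoop w cur bal segs = segs ++ segLoop w cur bal [] := by
  intro w
  induction w with
  | nil => intro cur bal segs; simp [segLoop]
  | cons c rest ih =>
      intro cur bal segs
      simp only [segLoop]
      by_cases hb : bal + (if c = '(' then 1 else -1) = 0
      · rw [if_pos hb, if_pos hb, ih [] _ (segs ++ [cur ++ [c]]), ih [] _ ([] ++ [cur ++ [c]])]
        simp
      · rw [if_neg hb, if_neg hb]
        exact ih (cur ++ [c]) _ segs

-- B's stage-1 loop computes the splitB decomposition, segment by segment
theorem segLoop_splitB : ∀ (w cur : List Char) (bal : Int) (segs : List (List Char)),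
    segLoop w cur bal segs =
      (match splitB w bal with
        | some (s, v) => segs ++ (cur ++ s) :: segLoop v [] 0 []
        | none => segs) := by
  intro w
  induction w with
  | nil => intro cur bal segs; simp [segLoop, splitB]
  | cons c rest ih =>
      intro cur bal segs
      simp only [segLoop, splitB]
      by_cases hb : bal + (if c = '(' then 1 else -1) = 0
      · rw [if_pos hb, if_pos hb, hb]
        rw [segLoop_acc rest [] 0 (segs ++ [cur ++ [c]])]
        simp
      · rw [if_neg hb, if_neg hb, ih (cur ++ [c]) _ segs]
        rcases splitB rest (bal + (if c = '(' then 1 else -1)) with _ | ⟨s₀, v₀⟩ <;> simp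

-- A's check succeeds on a chunk scanned from a positive balance
theorem checkAux_splitB : ∀ (w : List Char) (h : Int) (s v : List Char),
    1 ≤ h → splitB w h = some (s, v) → checkAux s h = true := by
  intro w
  induction w with
  | nil => intro h s v _ hsb; simp [splitB] at hsb
  | cons c rest ih =>
      intro h s v hh hsb
      simp only [splitB] at hsb
      by_cases hc : c = '('
      · simp only [hc, reduceIte] at hsb
        rw [if_neg (by omega : ¬ h + 1 = 0)] at hsb
        rcases hr : splitB rest (h + 1) with _ | ⟨s₀, v₀⟩ <;> rw [hr] at hsb <;> simp at hsb
        obtain ⟨hs, _⟩ := hsb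
        subst hs
        simp only [checkAux, hc, reduceIte]
        rw [if_neg (by omega : ¬ h + 1 < 0)]
        exact ih (h + 1) s₀ v₀ (by omega) hr
      · simp only [hc, reduceIte] at hsb
        by_cases hz : h + -1 = 0
        · rw [if_pos hz] at hsb
          simp at hsb
          obtain ⟨hs, _⟩ := hsb
          subst hs
          simp only [checkAux, hc, reduceIte]
          rw [if_neg (by omega : ¬ h - 1 < 0)]
          simp [checkAux]
          omega
        · rw [if_neg hz] at hsb
          rcases hr : splitB rest (h + -1) with _ | ⟨s₀, v₀⟩ <;> rw [hr] at hsb <;> simp at hsb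
          obtain ⟨hs, _⟩ := hsb
          subst hs
          simp only [checkAux, hc, reduceIte]
          rw [if_neg (by omega : ¬ h - 1 < 0)]
          have he : h - 1 = h + -1 := by ring
          rw [he]
          exact ih (h + -1) s₀ v₀ (by omega) hr

-- A's per-character flip loop is an append of a map
theorem foldl_append_map (f : Char → Char) :
    ∀ (l acc : List Char), l.foldl (fun a c => a ++ [f c]) acc = acc ++ l.map f := by
  intro l
  induction l with
  | nil => simp
  | cons c rest ih => intro acc; simp [ih, List.append_assoc]

-- the value of B's stage-2 fold, as a recursion over the segment list
def specR : List (List Char) → List Char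
  | [] => []
  | s :: rest => stepB (specR rest) s

theorem foldl_rev_stepB : ∀ (segs : List (List Char)),
    segs.reverse.foldl stepB [] = specR segs := by
  intro segs
  induction segs with
  | nil => rfl
  | cons s rest ih => simp [specR, List.foldl_append, ih]

-- main lemma: A's recursion equals specR over B's segment list
theorem solutionList_eq_specR : ∀ (w : List Char),
    solutionList w = specR (segLoop w [] 0 []) := by
  intro w
  induction hm : w.length using Nat.strong_induction_on generalizing w with
  | _ m ih =>
      rcases w with _ | ⟨c, rest⟩
      · simp [solutionList, segLoop, specR]
      · rw [solutionList]
        simp only [dif_neg (by simp : (c :: rest : List Char) ≠ [])]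
        have hsp : spliter (c :: rest) =
            (match splitB (c :: rest) 0 with
              | some (s, v) => (([] : List Char) ++ s, v)
              | none => ([], [])) := by
          have := spliterAux_eq_splitB (c :: rest) 0 0 []
          simpa using this
        rw [segLoop_splitB (c :: rest) [] 0 []]
        rcases hsb : splitB (c :: rest) 0 with _ | ⟨s, v⟩
        · rw [hsb] at hsp
          simp only at hsp
          rw [hsp]
          have : check ([] : List Char) = true := by decide
          simp [this, specR, solutionList]
        · rw [hsb] at hsp
          simp only [List.nil_append] at hsp
          rw [hsp]
          simp only
          have hdec := splitB_decomp _ _ _ _ hsb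
          by_cases hc : c = '('
          · subst hc
            have hstep : ∃ s₀, splitB rest (0 + 1) = some (s₀, v) ∧ s = '(' :: s₀ := by
              simp only [splitB, reduceIte] at hsb
              rw [if_neg (by omega : ¬ (0 : Int) + 1 = 0)] at hsb
              rcases hr : splitB rest (0 + 1) with _ | ⟨s₀, v₀⟩ <;> rw [hr] at hsb <;>
                simp at hsb
              obtain ⟨hs, hv⟩ := hsb
              subst hv
              exact ⟨s₀, rfl, hs.symm⟩
            obtain ⟨s₀, hr, hs'⟩ := hstep
            subst hs'
            have hvlen : v.length < rest.length + 1 := by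
              have hL := congrArg List.length hdec
              simp at hL
              omega
            have hIH : solutionList v = specR (segLoop v [] 0 []) :=
              ih v.length (by simp at hm; omega) v rfl
            have hchk : check ('(' :: s₀) = true := by
              simp only [check, checkAux, reduceIte]
              rw [if_neg (by omega : ¬ (0 : Int) + 1 < 0)]
              exact checkAux_splitB rest (0 + 1) s₀ v (by omega) hr
            simp [hchk, specR, stepB, hIH]
          · have hstep : ∃ s₀, s = c :: s₀ := by
              simp only [splitB, hc, reduceIte] at hsb
              rw [if_neg (by omega : ¬ (0 : Int) + -1 = 0)] at hsb
              rcases hr : splitB rest (0 + -1) with _ | ⟨s₀, v₀⟩ <;> rw [hr] at hsb <;>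
                simp at hsb
              exact ⟨s₀, hsb.1.symm⟩
            obtain ⟨s₀, hs'⟩ := hstep
            subst hs'
            have hvlen : v.length < rest.length + 1 := by
              have hL := congrArg List.length hdec
              simp at hL
              omega
            have hIH : solutionList v = specR (segLoop v [] 0 []) :=
              ih v.length (by simp at hm; omega) v rfl
            have hchk : check (c :: s₀) = false := by
              simp only [check, checkAux, hc, reduceIte]
              rw [if_pos (by omega : (0 : Int) - 1 < 0)]
            simp only [hchk, Bool.false_eq_true, reduceIte]
            rw [foldl_append_map]
            have hsr : specR ((c :: s₀) :: segLoop v [] 0 [])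
                = stepB (specR (segLoop v [] 0 [])) (c :: s₀) := rfl
            simp only [List.nil_append]
            rw [hsr]
            simp [stepB, hc, hIH, List.map_dropLast]

-- ===== VERDICT (by name: the statement is the Claim_ definition above) =====
theorem solution_spec : Claim_equal_solution := by
  intro p _
  unfold Spec_solution solution solution_alt
  rw [solutionList_eq_specR, foldl_rev_stepB]
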